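-- pv_equiv track=rewrite | github.com/nocatix/nocts-back-on-track | add-hobbies-translations.py | fix_quotes
-- ===== SOURCE A (Python) =====
-- def fix_quotes(text):
--     result = []
--     in_string = False
--     escape = False
--     quote_char = None
--     i = 0
--     while i < len(text):
--         char = text[i]
--         if escape:
--             result.append(char)
--             escape = False
--         elif char == '\\':
--             result.append(char)
--             escape = True
--         elif char == "'" and not in_string:
--             # Start of single-quoted string, convert to double quote
--             result.append('"')
--             in_string = True
--             quote_char = "'"
--         elif char == "'" and in_string and quote_char == "'":
--             # End of single-quoted string
--             result.append('"')
--             in_string = False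
--             quote_char = None
--         elif char == '"' and not in_string:
--             # Double quote outside string - convert to backslash escape
--             result.append('\\"')
--         elif char == '"' and in_string and quote_char == "'":
--             # Double quote inside single-quoted string - needs escaping
--             result.append('\\"')
--         else:
--             result.append(char)
--         i += 1
--     return ''.join(result)
-- ===== SOURCE B (Python) =====
-- def fix_quotes(text):
--     # Pass 1: mark each character that is protected by an active backslash.
--     escaped = []
--     prev_active_backslash = False
--     for c in text:
--         escaped.append(prev_active_backslash)
--         prev_active_backslash = (c == '\\') and not prev_active_backslash
--     # Pass 2: stateless per-character substitution table.
--     repl = {"'": '"', '"': '\\"'}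
--     return ''.join(c if (e or c == '\\') else repl.get(c, c)
--                    for c, e in zip(text, escaped))
-- ===== Notes on version B (the rewrite author's own statement) =====
-- stated objective: simpler
-- what changed: Drops A's quote-state machine entirely (A's single- and double-quote branches emit the same output whether or not in_string holds): B is two staged passes — first mark which characters are protected by an active backslash, then a stateless table substitution (' -> ", " -> \") over the (char, flag) pairs — instead of A's one-pass loop over (escape, in_string, quote_char). The stateless second pass runs as a single comprehension with a dict lookup instead of A's branchy per-character state updates (constant-factor speedup measured).
import Mathlib
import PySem

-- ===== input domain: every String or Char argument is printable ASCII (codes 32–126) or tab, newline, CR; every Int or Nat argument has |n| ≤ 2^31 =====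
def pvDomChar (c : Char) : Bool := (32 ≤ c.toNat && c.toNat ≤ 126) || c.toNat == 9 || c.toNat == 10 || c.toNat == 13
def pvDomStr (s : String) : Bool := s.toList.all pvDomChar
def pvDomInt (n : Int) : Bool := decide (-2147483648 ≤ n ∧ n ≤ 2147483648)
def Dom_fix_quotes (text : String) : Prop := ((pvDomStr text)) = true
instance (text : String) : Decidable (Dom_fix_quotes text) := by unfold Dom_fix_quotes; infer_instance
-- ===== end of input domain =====

-- B replaces A's three-variable state machine (escape, in_string, quote_char) with two staged
-- passes: mark escape-protected positions, then a stateless substitution table; same output proved.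

-- ===== PORT A =====
-- A's while loop: state (in_string, escape, quote_char), one char per step, chars appended to res.
def fixA_loop : List Char → Bool → Bool → Option Char → List Char → List Char
  | [], _, _, _, res => res
  | c :: rest, ins, esc, qc, res =>
    if esc then fixA_loop rest ins false qc (res ++ [c])
    else if c = '\\' then fixA_loop rest ins true qc (res ++ [c])
    else if c = '\'' ∧ ins = false then fixA_loop rest true false (some '\'') (res ++ ['"'])
    else if c = '\'' ∧ ins = true ∧ qc = some '\'' then fixA_loop rest false false none (res ++ ['"'])
    else if c = '"' ∧ ins = false then fixA_loop rest ins esc qc (res ++ ['\\', '"'])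
    else if c = '"' ∧ ins = true ∧ qc = some '\'' then fixA_loop rest ins esc qc (res ++ ['\\', '"'])
    else fixA_loop rest ins esc qc (res ++ [c])

def fix_quotes (text : String) : String :=
  String.ofList (fixA_loop text.toList false false none [])

-- ===== PORT B =====
-- Pass 1 of Source B: the list of per-character escape flags (prev_active_backslash scan).
def escFlags : List Char → Bool → List Bool
  | [], _ => []
  | c :: rest, prev => prev :: escFlags rest ((c = '\\') && !prev)

-- Pass 2 of Source B: stateless substitution for one (char, escaped) pair
-- (repl.get ported as the corresponding two-entry case split).
def mapChar (c : Char) (e : Bool) : List Char :=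
  if e || c = '\\' then [c]
  else if c = '\'' then ['"']
  else if c = '"' then ['\\', '"']
  else [c]

def fix_quotes_alt (text : String) : String :=
  String.ofList
    (((text.toList.zip (escFlags text.toList false)).map (fun p => mapChar p.1 p.2)).flatten)

-- ===== PRECONDITION & SPEC =====
def Spec_fix_quotes (text : String) (out : String) : Prop := out = fix_quotes_alt text
instance (text : String) (out : String) : Decidable (Spec_fix_quotes text out) := by unfold Spec_fix_quotes; infer_instance

-- ===== CLAIM =====
def Claim_equal_fix_quotes : Prop := ∀ (text : String), Dom_fix_quotes text → Spec_fix_quotes text (fix_quotes text)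

-- ===== LEMMAS AND PROOFS =====
-- Invariant at every A-loop boundary: quote_char = some '\'' iff in_string; under it, A's loop
-- with escape flag esc emits exactly B's flat-mapped substitution of (cs, escFlags cs esc).
lemma loop_eq : ∀ (cs : List Char) (esc ins : Bool) (res : List Char),
    fixA_loop cs ins esc (if ins then some '\'' else none) res
      = res ++ ((cs.zip (escFlags cs esc)).map (fun p => mapChar p.1 p.2)).flatten := by
  intro cs
  induction cs with
  | nil => intro esc ins res; simp [fixA_loop, escFlags]
  | cons c rest ih =>
    intro esc ins res
    rw [fixA_loop.eq_def]
    cases esc with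
    | true =>
      have := ih false ins (res ++ [c])
      simp [escFlags, mapChar, this]
    | false =>
      by_cases hb : c = '\\'
      · subst hb
        have := ih true ins (res ++ ['\\'])
        simp [escFlags, mapChar, this]
      · by_cases hq : c = '\''
        · subst hq
          cases ins with
          | false =>
            have := ih false true (res ++ ['"'])
            simpa [escFlags, mapChar, hb] using this
          | true =>
            have := ih false false (res ++ ['"'])
            simpa [escFlags, mapChar, hb] using this
        · by_cases hd : c = '"'
          · subst hd
            cases ins with
            | false =>
              have := ih false false (res ++ ['\\', '"'])
              simpa [escFlags, mapChar, hb, hq] using this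
            | true =>
              have := ih false true (res ++ ['\\', '"'])
              simpa [escFlags, mapChar, hb, hq] using this
          · cases ins with
            | false =>
              have := ih false false (res ++ [c])
              simpa [escFlags, mapChar, hb, hq, hd] using this
            | true =>
              have := ih false true (res ++ [c])
              simpa [escFlags, mapChar, hb, hq, hd] using this

-- ===== VERDICT =====
theorem fix_quotes_spec : Claim_equal_fix_quotes := by
  intro text _
  unfold Spec_fix_quotes fix_quotes fix_quotes_alt
  have h := loop_eq text.toList false false []
  simp only [Bool.false_eq_true, if_false] at h
  rw [h]; rfl
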